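-- pv_equiv track=rewrite | github.com/katanukisatoshi/cells-detector | apps/_old/line_filter.py | remove_lines_with_large_gap_bottom
-- ===== SOURCE A (Python) =====
-- def remove_lines_with_large_gap_bottom(horizontal_lines, gap_threshold=30):
--     bottom_lines = horizontal_lines[-5:]
--     filtered_bottom_lines = []
--     for i in range(len(bottom_lines) - 1):
--         if (bottom_lines[i+1] - bottom_lines[i]) <= gap_threshold:
--             filtered_bottom_lines.append(bottom_lines[i])
--             filtered_bottom_lines.append(bottom_lines[i+1])
--     filtered_bottom_lines = list(set(filtered_bottom_lines))  # Remove duplicates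
--     filtered_bottom_lines.sort()  # Ensure the lines are sorted
--     return filtered_bottom_lines
-- ===== SOURCE B (Python) =====
-- def remove_lines_with_large_gap_bottom(horizontal_lines, gap_threshold=30):
--     bottom = horizontal_lines[-5:]
--
--     def close_pairs(prev, rest):
--         if not rest:
--             return []
--         cur = rest[0]
--         rest_out = close_pairs(cur, rest[1:])
--         return ([prev, cur] + rest_out) if cur - prev <= gap_threshold else rest_out
--
--     picked = close_pairs(bottom[0], bottom[1:]) if bottom else []
--     picked.sort()
--
--     def dedup(prev, xs):
--         if not xs:
--             return []
--         if prev is not None and xs[0] == prev: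
--             return dedup(prev, xs[1:])
--         return [xs[0]] + dedup(xs[0], xs[1:])
--
--     return dedup(None, picked)
-- ===== Notes on version B (the rewrite author's own statement) =====
-- stated objective: alternative
-- what changed: B replaces A's index loop over range plus set() dedup with a fully recursive pipeline: a structural recursion over the tail slice carrying the previous element emits the close-pair values, then the list is sorted WITH duplicates and duplicates are removed by a second recursion over the sorted list comparing each element with the previously emitted one (sort-then-adjacent-dedup instead of set-then-sort).
import Mathlib
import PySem

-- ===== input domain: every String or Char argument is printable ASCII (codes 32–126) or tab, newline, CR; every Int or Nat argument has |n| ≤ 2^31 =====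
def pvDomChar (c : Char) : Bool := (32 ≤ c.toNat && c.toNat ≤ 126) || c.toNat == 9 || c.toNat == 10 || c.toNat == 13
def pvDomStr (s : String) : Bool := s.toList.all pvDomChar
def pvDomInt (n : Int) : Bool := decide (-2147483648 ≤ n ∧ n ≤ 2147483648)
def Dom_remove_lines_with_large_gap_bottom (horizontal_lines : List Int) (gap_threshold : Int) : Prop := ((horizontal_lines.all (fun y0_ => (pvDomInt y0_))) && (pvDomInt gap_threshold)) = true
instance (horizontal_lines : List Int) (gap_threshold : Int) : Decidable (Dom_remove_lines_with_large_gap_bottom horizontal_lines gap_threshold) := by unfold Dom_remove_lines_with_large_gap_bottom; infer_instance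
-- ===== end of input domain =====

-- B replaces A's index loop + set() dedup by a recursive close-pair walk, a sort with duplicates, and a recursive adjacent-dedup scan (alternative decomposition, same cost).

-- ===== PORT A =====
def remove_lines_with_large_gap_bottom (horizontal_lines : List Int) (gap_threshold : Int) : List Int :=
  let bottom := PySem.List.slice horizontal_lines (some (-5)) none
  let filtered := (PySem.List.pyRange 0 ((bottom.length : Int) - 1) 1).foldl
    (fun acc i =>
      if PySem.List.pyGetD bottom (i + 1) 0 - PySem.List.pyGetD bottom i 0 ≤ gap_threshold then
        acc ++ [PySem.List.pyGetD bottom i 0] ++ [PySem.List.pyGetD bottom (i + 1) 0]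
      else acc) []
  PySem.List.sorted (PySem.Set.ofList filtered) (fun x => x) false

-- ===== PORT B =====
-- recursive close_pairs helper: walks the list carrying the previous element
def pvClosePairs (g : Int) (prev : Int) : List Int → List Int
  | [] => []
  | cur :: tail =>
      let rest_out := pvClosePairs g cur tail
      if cur - prev ≤ g then prev :: cur :: rest_out else rest_out

-- recursive dedup helper: drops an element equal to the previously emitted one
def pvDedup (prev : Option Int) : List Int → List Int
  | [] => []
  | x :: t =>
      match prev with
      | some p => if x = p then pvDedup (some p) t else x :: pvDedup (some x) t
      | none => x :: pvDedup (some x) t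

def remove_lines_with_large_gap_bottom_alt (horizontal_lines : List Int) (gap_threshold : Int) : List Int :=
  let bottom := PySem.List.slice horizontal_lines (some (-5)) none
  let picked :=
    match bottom with
    | [] => []
    | h :: t => pvClosePairs gap_threshold h t
  pvDedup none (PySem.List.sorted picked (fun x => x) false)

-- ===== PRECONDITION & SPEC =====
def Spec_remove_lines_with_large_gap_bottom (horizontal_lines : List Int) (gap_threshold : Int) (out : List Int) : Prop := out = remove_lines_with_large_gap_bottom_alt horizontal_lines gap_threshold
instance (horizontal_lines : List Int) (gap_threshold : Int) (out : List Int) : Decidable (Spec_remove_lines_with_large_gap_bottom horizontal_lines gap_threshold out) := by unfold Spec_remove_lines_with_large_gap_bottom; infer_instance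

-- ===== CLAIM (what is proved, stated in full; the proofs are below) =====
def Claim_equal_remove_lines_with_large_gap_bottom : Prop := ∀ (horizontal_lines : List Int) (gap_threshold : Int), Dom_remove_lines_with_large_gap_bottom horizontal_lines gap_threshold → Spec_remove_lines_with_large_gap_bottom horizontal_lines gap_threshold (remove_lines_with_large_gap_bottom horizontal_lines gap_threshold)

-- ===== LEMMAS AND PROOFS =====

theorem pyGetD_cons_succ (l : List Int) (x : Int) (i : Nat) :
    PySem.List.pyGetD (x :: l) ((i : Int) + 1) 0 = PySem.List.pyGetD l (i : Int) 0 := by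
  have h1 : ((i : Int) + 1) = ((i + 1 : Nat) : Int) := by push_cast; ring
  rw [h1, PySem.List.pyGetD_natCast, PySem.List.pyGetD_natCast]
  simp

theorem closePairs_eq (g : Int) (t : List Int) (h : Int) :
    (List.range t.length).flatMap
      (fun (i : Nat) =>
        if PySem.List.pyGetD (h :: t) ((i : Int) + 1) 0 - PySem.List.pyGetD (h :: t) (i : Int) 0 ≤ g then
          [PySem.List.pyGetD (h :: t) ((i : Int)) 0, PySem.List.pyGetD (h :: t) ((i : Int) + 1) 0]
        else []) = pvClosePairs g h t := by
  induction t generalizing h with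
  | nil => simp [pvClosePairs]
  | cons c t' ih =>
    rw [List.length_cons, List.range_succ_eq_map, List.flatMap_cons, List.flatMap_map]
    have hhead :
        (if PySem.List.pyGetD (h :: c :: t') (((0 : Nat) : Int) + 1) 0 - PySem.List.pyGetD (h :: c :: t') ((0 : Nat) : Int) 0 ≤ g then
          [PySem.List.pyGetD (h :: c :: t') ((0 : Nat) : Int) 0, PySem.List.pyGetD (h :: c :: t') (((0 : Nat) : Int) + 1) 0]
        else []) = if c - h ≤ g then [h, c] else [] := by
      have h1 : PySem.List.pyGetD (h :: c :: t') 1 0 = c := by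
        rw [show (1 : Int) = ((1 : Nat) : Int) by norm_num, PySem.List.pyGetD_natCast]; rfl
      simp only [Nat.cast_zero, zero_add, h1, PySem.List.pyGetD_zero_cons]
    have htail :
        (List.range t'.length).flatMap
          (fun (i : Nat) =>
            if PySem.List.pyGetD (h :: c :: t') ((i.succ : Int) + 1) 0 - PySem.List.pyGetD (h :: c :: t') (i.succ : Int) 0 ≤ g then
              [PySem.List.pyGetD (h :: c :: t') ((i.succ : Int)) 0, PySem.List.pyGetD (h :: c :: t') ((i.succ : Int) + 1) 0]
            else []) = pvClosePairs g c t' := by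
      rw [← ih c]
      congr 1
      funext i
      have hc1 : ((i.succ : Nat) : Int) = (i : Int) + 1 := by push_cast; ring
      have hc2 : ((i + 1 : Nat) : Int) = (i : Int) + 1 := by push_cast; ring
      simp only [hc1, pyGetD_cons_succ (c :: t') h i]
      rw [show ((i : Int) + 1 + 1) = ((i + 1 : Nat) : Int) + 1 by push_cast; ring,
        pyGetD_cons_succ (c :: t') h (i + 1), hc2]
    rw [hhead, htail]
    show _ = pvClosePairs g h (c :: t')
    simp only [pvClosePairs]
    split <;> simp


theorem pvDedup_cons_some (p x : Int) (t : List Int) :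
    pvDedup (some p) (x :: t) = if x = p then pvDedup (some p) t else x :: pvDedup (some x) t := rfl
theorem pvDedup_cons_none (x : Int) (t : List Int) :
    pvDedup none (x :: t) = x :: pvDedup (some x) t := rfl
theorem mem_pvDedup_some (l : List Int) (p : Int) (hlb : ∀ y ∈ l, p ≤ y) (hs : l.Pairwise (· ≤ ·)) (x : Int) :
    x ∈ pvDedup (some p) l ↔ x ∈ l ∧ x ≠ p := by
  induction l generalizing p with
  | nil => simp [pvDedup]
  | cons v t ih =>
    rw [List.pairwise_cons] at hs
    have hpv : p ≤ v := hlb v (List.mem_cons_self)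
    by_cases hvp : v = p
    · subst hvp
      rw [pvDedup_cons_some, if_pos rfl]
      simp only [ih v (fun y hy => hs.1 y hy) hs.2, List.mem_cons]
      constructor
      · rintro ⟨hx, hne⟩; exact ⟨Or.inr hx, hne⟩
      · rintro ⟨hx | hx, hne⟩
        · exact absurd hx hne
        · exact ⟨hx, hne⟩
    · rw [pvDedup_cons_some, if_neg hvp]
      simp only [List.mem_cons, ih v (fun y hy => hs.1 y hy) hs.2]
      constructor
      · rintro (rfl | ⟨hx, hne⟩)
        · exact ⟨Or.inl rfl, hvp⟩
        · have : p < v := lt_of_le_of_ne hpv (fun h => hvp h.symm)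
          have : p < x := lt_of_lt_of_le this (hs.1 x hx)
          exact ⟨Or.inr hx, by omega⟩
      · rintro ⟨rfl | hx, hne⟩
        · exact Or.inl rfl
        · by_cases hxv : x = v
          · exact Or.inl hxv
          · exact Or.inr ⟨hx, hxv⟩

theorem mem_pvDedup_none (l : List Int) (hs : l.Pairwise (· ≤ ·)) (x : Int) :
    x ∈ pvDedup none l ↔ x ∈ l := by
  cases l with
  | nil => simp [pvDedup]
  | cons v t =>
    rw [List.pairwise_cons] at hs
    rw [pvDedup_cons_none]
    simp only [List.mem_cons, mem_pvDedup_some t v hs.1 hs.2]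
    constructor
    · rintro (rfl | ⟨hx, _⟩)
      · exact Or.inl rfl
      · exact Or.inr hx
    · rintro (rfl | hx)
      · exact Or.inl rfl
      · by_cases hxv : x = v
        · exact Or.inl hxv
        · exact Or.inr ⟨hx, hxv⟩

theorem pairwise_pvDedup_some (l : List Int) (p : Int) (hlb : ∀ y ∈ l, p ≤ y) (hs : l.Pairwise (· ≤ ·)) :
    (pvDedup (some p) l).Pairwise (· < ·) ∧ ∀ x ∈ pvDedup (some p) l, p < x := by
  induction l generalizing p with
  | nil => simp [pvDedup]
  | cons v t ih =>
    rw [List.pairwise_cons] at hs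
    have hpv : p ≤ v := hlb v (List.mem_cons_self)
    by_cases hvp : v = p
    · subst hvp
      rw [pvDedup_cons_some, if_pos rfl] at *
      exact ih v (fun y hy => hs.1 y hy) hs.2
    · have hv := ih v (fun y hy => hs.1 y hy) hs.2
      have hplt : p < v := lt_of_le_of_ne hpv (fun h => hvp h.symm)
      rw [pvDedup_cons_some, if_neg hvp]
      simp only [List.pairwise_cons, List.mem_cons]
      refine ⟨⟨fun y hy => hv.2 y hy, hv.1⟩, ?_⟩
      rintro x (rfl | hx)
      · exact hplt
      · exact lt_trans hplt (hv.2 x hx)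

theorem pairwise_pvDedup_none (l : List Int) (hs : l.Pairwise (· ≤ ·)) :
    (pvDedup none l).Pairwise (· < ·) := by
  cases l with
  | nil => simp [pvDedup]
  | cons v t =>
    rw [List.pairwise_cons] at hs
    have hv := pairwise_pvDedup_some t v hs.1 hs.2
    rw [pvDedup_cons_none]
    simp only [List.pairwise_cons]
    exact ⟨hv.2, hv.1⟩

theorem core (g h : Int) (t : List Int) :
    PySem.List.sorted (PySem.Set.ofList
      ((PySem.List.pyRange 0 (((h :: t).length : Int) - 1) 1).foldl
        (fun acc i =>
          if PySem.List.pyGetD (h :: t) (i + 1) 0 - PySem.List.pyGetD (h :: t) i 0 ≤ g then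
            acc ++ [PySem.List.pyGetD (h :: t) i 0] ++ [PySem.List.pyGetD (h :: t) (i + 1) 0]
          else acc) [])) (fun x => x) false
    = pvDedup none (PySem.List.sorted (pvClosePairs g h t) (fun x => x) false) := by
  have hfun : (fun (acc : List Int) (i : Int) =>
      if PySem.List.pyGetD (h :: t) (i + 1) 0 - PySem.List.pyGetD (h :: t) i 0 ≤ g then
        acc ++ [PySem.List.pyGetD (h :: t) i 0] ++ [PySem.List.pyGetD (h :: t) (i + 1) 0]
      else acc) = fun acc i => acc ++
        (if PySem.List.pyGetD (h :: t) (i + 1) 0 - PySem.List.pyGetD (h :: t) i 0 ≤ g then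
          [PySem.List.pyGetD (h :: t) i 0, PySem.List.pyGetD (h :: t) (i + 1) 0]
        else []) := by
    funext acc i; split <;> simp
  rw [hfun, PySem.List.foldl_append_eq_flatMap, List.nil_append]
  have hlen : (((h :: t).length : Int) - 1) = ((t.length : Nat) : Int) := by
    simp
  rw [hlen, PySem.List.pyRange_one, List.flatMap_map]
  simp only [zero_add, sub_zero, Int.toNat_natCast]
  rw [closePairs_eq g t h]
  -- final: sorted(set(picked)) = dedup(sorted(picked))
  set picked := pvClosePairs g h t with hp
  set s := PySem.List.sorted picked (fun x => x) false with hsdef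
  have hs : s.Pairwise (· ≤ ·) := PySem.List.sorted_pairwise picked (fun x => x)
  have hpl : (pvDedup none s).Pairwise (· < ·) := pairwise_pvDedup_none s hs
  have hnd1 : (pvDedup none s).Nodup := hpl.imp (fun hab => ne_of_lt hab)
  have hperm : (pvDedup none s).Perm (PySem.Set.ofList picked) := by
    rw [List.perm_ext_iff_of_nodup hnd1 (PySem.Set.nodup_ofList picked)]
    intro x
    rw [mem_pvDedup_none s hs x, hsdef, PySem.List.mem_sorted, PySem.Set.mem_ofList]
  exact PySem.List.sorted_eq_of_perm_of_pairwise_lt _ _ _ hperm hpl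

-- ===== VERDICT (by name: the statement is the Claim_ definition above) =====
theorem remove_lines_with_large_gap_bottom_spec : Claim_equal_remove_lines_with_large_gap_bottom := by
  intro hl g _
  unfold Spec_remove_lines_with_large_gap_bottom
  unfold remove_lines_with_large_gap_bottom remove_lines_with_large_gap_bottom_alt
  cases hb : PySem.List.slice hl (some (-5)) none with
  | nil => rfl
  | cons h t => exact core g h t
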